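-- pv_equiv track=rewrite | github.com/yashkens/belarusian_enh_dep_annotation | scripts/bert_vectorizer_aligner.py | get_subtokens_to_join
-- ===== SOURCE A (Python) =====
-- def get_subtokens_to_join(tokenized):
--     to_join = []
--     join = []
--     for i, token in enumerate(tokenized):
--         if token.startswith('##'):
--             join.append(i)
--         else:
--             if join:
--                 join.insert(0, join[0]-1)
--                 to_join.append(join)
--             join = []
--     return to_join
-- ===== SOURCE B (Python) =====
-- def get_subtokens_to_join(tokenized):
--     flags = [t.startswith('##') for t in tokenized]
--     n = len(flags)
--     starts = [i for i in range(n) if flags[i] and (i == 0 or not flags[i - 1])]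
--     ends = [i for i in range(n) if flags[i] and i + 1 < n and not flags[i + 1]]
--     return [list(range(s - 1, e + 1)) for s, e in zip(starts, ends)]
-- ===== Notes on version B (the rewrite author's own statement) =====
-- stated objective: alternative
-- what changed: Replaces A's incremental accumulate-and-flush loop (mutable pending-run buffer, flushed when a non-'##' token is seen) with an up-front boundary scan: comprehensions collect run-start and run-end indices over the flag list, zip pairs them (a trailing unterminated run is dropped by zip's truncation), and each group is emitted as a closed-form range(start-1, end+1).
import Mathlib
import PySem

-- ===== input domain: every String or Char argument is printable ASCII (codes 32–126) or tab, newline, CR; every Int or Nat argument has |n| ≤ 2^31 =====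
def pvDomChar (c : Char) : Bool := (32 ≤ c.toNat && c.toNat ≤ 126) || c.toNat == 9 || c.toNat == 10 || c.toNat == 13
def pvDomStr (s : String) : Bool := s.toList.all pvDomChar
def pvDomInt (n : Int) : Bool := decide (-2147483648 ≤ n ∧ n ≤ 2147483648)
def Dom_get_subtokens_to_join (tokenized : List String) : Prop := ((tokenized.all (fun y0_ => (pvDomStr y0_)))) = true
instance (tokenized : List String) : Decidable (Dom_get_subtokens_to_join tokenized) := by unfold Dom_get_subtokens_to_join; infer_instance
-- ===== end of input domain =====

-- B replaces A's incremental accumulate-and-flush loop by an up-front run-boundary scan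
-- (index comprehensions for run starts/ends, groups emitted as closed-form ranges);
-- objective: alternative decomposition, same cost.

-- ===== PORT A =====
def get_subtokens_to_join (tokenized : List String) : List (List Int) :=
  ((PySem.List.enumerate tokenized 0).foldl
    (fun (st : List (List Int) × List Int) (p : Int × String) =>
      if PySem.Str.startswith p.2 "##" then (st.1, st.2 ++ [p.1])
      else if st.2 ≠ [] then
        (st.1 ++ [PySem.List.insert st.2 0 (PySem.List.pyGetD st.2 0 0 - 1)], ([] : List Int))
      else (st.1, ([] : List Int)))
    ([], [])).1

-- ===== PORT B =====
def get_subtokens_to_join_alt (tokenized : List String) : List (List Int) :=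
  let flags := tokenized.map (fun t => PySem.Str.startswith t "##")
  let n : Int := (flags.length : Int)
  let starts := (PySem.List.pyRange 0 n 1).filter (fun i =>
    PySem.List.pyGetD flags i false &&
      (decide (i = 0) || !(PySem.List.pyGetD flags (i - 1) false)))
  let ends := (PySem.List.pyRange 0 n 1).filter (fun i =>
    PySem.List.pyGetD flags i false && decide (i + 1 < n) &&
      !(PySem.List.pyGetD flags (i + 1) false))
  (starts.zip ends).map (fun p => PySem.List.pyRange (p.1 - 1) (p.2 + 1) 1)

-- ===== PRECONDITION & SPEC =====
def Spec_get_subtokens_to_join (tokenized : List String) (out : List (List Int)) : Prop := out = get_subtokens_to_join_alt tokenized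
instance (tokenized : List String) (out : List (List Int)) : Decidable (Spec_get_subtokens_to_join tokenized out) := by unfold Spec_get_subtokens_to_join; infer_instance

-- ===== CLAIM (what is proved, stated in full; the proofs are below) =====
def Claim_equal_get_subtokens_to_join : Prop := ∀ (tokenized : List String), Dom_get_subtokens_to_join tokenized → Spec_get_subtokens_to_join tokenized (get_subtokens_to_join tokenized)

-- ===== LEMMAS AND PROOFS =====

-- A's loop over the flag list, with the running index and pending run as parameters.
def runsCore : List Bool → Int → List Int → List (List Int)
  | [], _, _ => []
  | b :: bs, i, join =>
    if b then runsCore bs (i + 1) (join ++ [i])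
    else if join ≠ [] then
      (PySem.List.insert join 0 (PySem.List.pyGetD join 0 0 - 1)) :: runsCore bs (i + 1) []
    else runsCore bs (i + 1) []

-- B's start indices (run starts), relative to a suffix, with the previous flag threaded.
def sIdx : Bool → List Bool → List Nat
  | _, [] => []
  | prev, b :: bs => (if b && !prev then [0] else []) ++ (sIdx b bs).map (· + 1)

-- B's end indices (run ends having a successor), relative to a suffix.
def eIdx : List Bool → List Nat
  | [] => []
  | [_] => []
  | b :: c :: bs => (if b && !c then [0] else []) ++ (eIdx (c :: bs)).map (· + 1)

def render (i : Int) (ps : List (Nat × Nat)) : List (List Int) :=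
  ps.map (fun p => PySem.List.pyRange (i + p.1 - 1) (i + p.2 + 1) 1)

theorem foldA_eq_runsCore (ts : List String) (i : Int) (acc : List (List Int)) (join : List Int) :
    ((PySem.List.enumerate ts i).foldl
      (fun (st : List (List Int) × List Int) (p : Int × String) =>
        if PySem.Str.startswith p.2 "##" then (st.1, st.2 ++ [p.1])
        else if st.2 ≠ [] then
          (st.1 ++ [PySem.List.insert st.2 0 (PySem.List.pyGetD st.2 0 0 - 1)], ([] : List Int))
        else (st.1, ([] : List Int)))
      (acc, join)).1
    = acc ++ runsCore (ts.map (fun t => PySem.Str.startswith t "##")) i join := by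
  induction ts generalizing i acc join with
  | nil => simp [PySem.List.enumerate_nil, runsCore]
  | cons t ts ih =>
    rw [PySem.List.enumerate_cons, List.foldl_cons, List.map_cons]
    simp only [runsCore]
    by_cases h : PySem.Str.startswith t "##"
    · simp only [h, ite_true]
      rw [ih]
    · simp only [h, Bool.false_eq_true, ite_false]
      by_cases hj : join = []
      · simp only [hj, ne_eq, not_true_eq_false, ite_false]
        rw [ih]
      · simp only [ne_eq, hj, not_false_iff, ite_true]
        rw [ih]
        simp

theorem map_add_add (l : List Nat) (a b : Nat) :
    (l.map (· + a)).map (· + b) = l.map (· + (a + b)) := by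
  rw [List.map_map]; apply List.map_congr_left; intro x _; simp [Function.comp]; omega

theorem sIdx_true_replicate (m : Nat) (l : List Bool) :
    sIdx true (List.replicate m true ++ l) = (sIdx true l).map (· + m) := by
  induction m with
  | zero => simp
  | succ m ih =>
    rw [List.replicate_succ, List.cons_append, sIdx, ih, map_add_add]
    simp

theorem runsCore_replicate (m : Nat) (l : List Bool) (i : Int) (join : List Int) :
    runsCore (List.replicate m true ++ l) i join
      = runsCore l (i + m) (join ++ PySem.List.pyRange i (i + m) 1) := by
  induction m generalizing i join with
  | zero => simp [PySem.List.pyRange_one_eq_nil]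
  | succ m ih =>
    rw [List.replicate_succ, List.cons_append, runsCore]
    simp only [if_true]
    rw [ih]
    have h1 : i + ((m+1 : Nat) : Int) = i + 1 + (m : Nat) := by push_cast; ring
    rw [h1, List.append_assoc, List.singleton_append,
      ← PySem.List.pyRange_one_cons (by omega : i < i + 1 + ((m:Nat) : Int))]

theorem eIdx_replicate (m : Nat) : eIdx (List.replicate m true) = [] := by
  induction m with
  | zero => rfl
  | succ m ih =>
    cases m with
    | zero => rfl
    | succ k =>
      rw [List.replicate_succ, List.replicate_succ, eIdx, ← List.replicate_succ]
      simp [ih]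

theorem eIdx_split (m : Nat) (rest : List Bool) :
    eIdx (List.replicate m true ++ false :: rest)
      = (if m = 0 then [] else [m-1]) ++ (eIdx rest).map (· + (m+1)) := by
  induction m with
  | zero =>
    cases rest with
    | nil => rfl
    | cons c cs => rw [List.replicate, List.nil_append, eIdx]; simp
  | succ m ih =>
    cases m with
    | zero =>
      rw [show List.replicate 1 true ++ false :: rest = true :: false :: rest from rfl, eIdx]
      cases rest with
      | nil => rfl
      | cons c cs =>
        rw [show eIdx (false :: c :: cs) = (eIdx (c :: cs)).map (· + 1) from by rw [eIdx]; simp,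
          map_add_add]
        simp
    | succ k =>
      rw [List.replicate_succ, List.replicate_succ, List.cons_append, List.cons_append, eIdx,
        ← List.cons_append, ← List.replicate_succ, ih]
      simp only [Nat.succ_ne_zero, if_false, List.map_append, map_add_add]
      simp

theorem sIdx_split (m : Nat) (rest : List Bool) :
    sIdx false (List.replicate m true ++ false :: rest)
      = (if m = 0 then [] else [0]) ++ (sIdx false rest).map (· + (m+1)) := by
  cases m with
  | zero => rw [List.replicate, List.nil_append, sIdx]; simp
  | succ m =>
    rw [List.replicate_succ, List.cons_append, sIdx, sIdx_true_replicate,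
      show sIdx true (false :: rest) = (sIdx false rest).map (· + 1) from by rw [sIdx]; simp,
      map_add_add, map_add_add]
    simp [Nat.add_comm]

theorem render_shift (i : Int) (c : Nat) (S E : List Nat) :
    render i ((S.map (· + c)).zip (E.map (· + c))) = render (i + c) (S.zip E) := by
  rw [List.zip_map, render, render, List.map_map]
  apply List.map_congr_left; intro p _
  simp only [Function.comp, Prod.map]
  congr 1 <;> push_cast <;> ring

theorem pyRange_pred_cons (c d : Int) (h : c < d) :
    PySem.List.pyRange (c - 1) d 1 = (c - 1) :: c :: PySem.List.pyRange (c + 1) d 1 := by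
  rw [PySem.List.pyRange_one_cons (by omega : c - 1 < d), show c - 1 + 1 = c by ring,
    PySem.List.pyRange_one_cons h]

theorem main_runs_aux : ∀ (n : Nat) (l : List Bool), l.length = n → ∀ (i : Int),
    runsCore l i [] = render i ((sIdx false l).zip (eIdx l)) := by
  intro n
  induction n using Nat.strong_induction_on with
  | _ n ih =>
    intro l hl i
    have hld : l = l.takeWhile (fun x => x) ++ l.dropWhile (fun x => x) :=
      (List.takeWhile_append_dropWhile).symm
    have ht : l.takeWhile (fun x => x) = List.replicate (l.takeWhile (fun x => x)).length true := by
      apply List.eq_replicate_length.mpr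
      intro b hb
      have := List.mem_takeWhile_imp hb
      simpa using this
    set m := (l.takeWhile (fun x => x)).length with hm
    cases hd : l.dropWhile (fun x => x) with
    | nil =>
      rw [hld, hd, ht, List.append_nil, ← List.append_nil (List.replicate m true),
        runsCore_replicate m [] i [], List.append_nil, eIdx_replicate]
      simp [runsCore, render]
    | cons x rest =>
      have hx : x = false := by
        have hne : l.dropWhile (fun x => x) ≠ [] := by rw [hd]; simp
        have := List.head_dropWhile_not (fun x => x) hne
        simpa [hd] using this
      subst hx
      have hlen : m + (rest.length + 1) = n := by
        rw [← hl]; conv_rhs => rw [hld]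
        rw [hd]; simp [hm]
      have hrest : rest.length < n := by omega
      rw [hld, hd, ht]
      rw [runsCore_replicate m (false :: rest) i [], List.nil_append]
      rw [sIdx_split, eIdx_split]
      cases m with
      | zero =>
        rw [show PySem.List.pyRange i (i + ((0:Nat):Int)) 1 = [] from by
          simp [PySem.List.pyRange_one_eq_nil]]
        rw [runsCore]
        simp only [ne_eq, not_true_eq_false, Bool.false_eq_true, ite_false,
          if_true, List.nil_append]
        rw [render_shift, ih rest.length hrest rest rfl]
        congr 1
        push_cast
        ring
      | succ k =>
        have hik : i < i + ((k+1:Nat):Int) := by push_cast; omega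
        rw [PySem.List.pyRange_one_cons hik, runsCore]
        simp only [Bool.false_eq_true, ite_false, ne_eq, List.cons_ne_nil, not_false_iff,
          ite_true, Nat.succ_ne_zero]
        rw [PySem.List.insert_zero, PySem.List.pyGetD_zero_cons]
        rw [ih rest.length hrest rest rfl (i + ((k+1:Nat):Int) + 1)]
        rw [List.singleton_append, List.singleton_append, List.zip_cons_cons]
        rw [show render i ((0, k + 1 - 1) ::
              (List.map (fun x => x + (k + 1 + 1)) (sIdx false rest)).zip
                (List.map (fun x => x + (k + 1 + 1)) (eIdx rest)))
            = PySem.List.pyRange (i + ((0:Nat):Int) - 1) (i + ((k + 1 - 1 : Nat):Int) + 1) 1 ::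
              render i ((List.map (fun x => x + (k + 1 + 1)) (sIdx false rest)).zip
                (List.map (fun x => x + (k + 1 + 1)) (eIdx rest))) from rfl]
        rw [render_shift]
        congr 1
        · push_cast
          rw [show i + 0 - 1 = i - 1 by ring, show i + ((k:Int) + 1) = i + (k:Int) + 1 by ring,
            pyRange_pred_cons i (i + (k:Int) + 1) (by omega)]
        · congr 1
          push_cast
          ring

theorem filter_starts (l : List Bool) (prev : Bool) :
    (List.range l.length).filter
      (fun k => l.getD k false && (if k = 0 then !prev else !(l.getD (k-1) false)))
    = sIdx prev l := by
  induction l generalizing prev with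
  | nil => rfl
  | cons b bs ih =>
    rw [List.length_cons, List.range_succ_eq_map, List.filter_cons, List.filter_map, sIdx, ← ih b]
    rw [List.filter_congr (l := List.range bs.length)
      (q := fun k => bs.getD k false && (if k = 0 then !b else !(bs.getD (k-1) false)))
      (by intro k _; cases k <;> simp)]
    cases b <;> cases prev <;> simp

theorem filter_ends (l : List Bool) :
    (List.range l.length).filter
      (fun k => l.getD k false && decide (k + 1 < l.length) && !(l.getD (k+1) false))
    = eIdx l := by
  induction l with
  | nil => rfl
  | cons b bs ih =>
    match bs, ih with
    | [], _ => simp [eIdx]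
    | c :: cs, ih =>
      rw [List.length_cons, List.range_succ_eq_map, List.filter_cons, List.filter_map, eIdx, ← ih]
      rw [List.filter_congr (l := List.range (c :: cs).length)
        (q := fun k => (c :: cs).getD k false && decide (k + 1 < (c :: cs).length) && !((c :: cs).getD (k+1) false))
        (by intro k _; cases k <;> simp [Nat.succ_le_iff])]
      cases b <;> cases c <;> simp

theorem startsInt (F : List Bool) :
    (List.map (fun k : Nat => (k : Int)) (List.range F.length)).filter (fun i =>
      PySem.List.pyGetD F i false &&
        (decide (i = 0) || !(PySem.List.pyGetD F (i - 1) false)))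
    = List.map (fun k : Nat => (k : Int)) (sIdx false F) := by
  rw [List.filter_map (f := fun k : Nat => (k : Int)) (l := List.range F.length)]
  rw [List.filter_congr (l := List.range F.length)
    (q := fun k => F.getD k false && (if k = 0 then !false else !(F.getD (k-1) false)))
    (by intro k _
        cases k with
        | zero => simp [PySem.List.pyGetD_zero]
        | succ n =>
          simp only [Function.comp_apply, PySem.List.pyGetD_natCast]
          rw [show ((n+1 : Nat) : Int) - 1 = ((n : Nat) : Int) by push_cast; ring]
          simp [PySem.List.pyGetD_natCast, show ((n : Int)) + 1 ≠ 0 from by omega])]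
  rw [filter_starts]

theorem endsInt (F : List Bool) :
    (List.map (fun k : Nat => (k : Int)) (List.range F.length)).filter (fun i =>
      PySem.List.pyGetD F i false && decide (i + 1 < (F.length : Int)) &&
        !(PySem.List.pyGetD F (i + 1) false))
    = List.map (fun k : Nat => (k : Int)) (eIdx F) := by
  rw [List.filter_map (f := fun k : Nat => (k : Int)) (l := List.range F.length)]
  rw [List.filter_congr (l := List.range F.length)
    (q := fun k => F.getD k false && decide (k + 1 < F.length) && !(F.getD (k+1) false))
    (by intro k _
        simp only [Function.comp_apply, ← Nat.cast_add_one, PySem.List.pyGetD_natCast,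
          Nat.cast_lt])]
  rw [filter_ends]

theorem alt_eq_render (tokenized : List String) :
    get_subtokens_to_join_alt tokenized
      = render 0 ((sIdx false (tokenized.map (fun t => PySem.Str.startswith t "##"))).zip
                  (eIdx (tokenized.map (fun t => PySem.Str.startswith t "##")))) := by
  unfold get_subtokens_to_join_alt
  dsimp only
  set F := tokenized.map (fun t => PySem.Str.startswith t "##") with hF
  rw [PySem.List.pyRange_zero_natCast F.length, startsInt F, endsInt F,
    List.zip_map, render, List.map_map]
  apply List.map_congr_left; intro p _
  simp only [Function.comp, Prod.map]
  congr 1 <;> ring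

-- ===== VERDICT (by name: the statement is the Claim_ definition above) =====
theorem get_subtokens_to_join_spec : Claim_equal_get_subtokens_to_join := by
  intro tokenized _
  unfold Spec_get_subtokens_to_join get_subtokens_to_join
  rw [foldA_eq_runsCore, List.nil_append, alt_eq_render,
    main_runs_aux (tokenized.map (fun t => PySem.Str.startswith t "##")).length _ rfl 0]
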